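-- pv_equiv track=rewrite | github.com/CMSgov/ato-blueprint | siteapp/oidc.py | parse_jobcode_claim
-- ===== SOURCE A (Python) =====
-- from itertools import groupby
-- from typing import List
--
-- def _labeler(cns: List[bool]) -> List[int]:
--     """
--     Generator that takes a list of boolean values that correspond to
--     a list of DN parts where "true"
--     values indicate a change in item, and
--     produces a corresponding list of labels (integers)
--     """
--     label = 0
--     for n in cns:
--         if n:
--             label += 1
--         yield label
--
-- def parse_jobcode_claim(s: str) -> List[str]:
--     """
--     Given a jobcode claim, return a list of jobcodes (FQDNS).
--     The tricky bit is that a jobcode claim could have more than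
--     one job code, and the job codes are separated by commas.
--     Unfortunately, there are embedded commas in the FQDNs, so
--     this is not that easy to parse.  The idea here is to break up
--     the claim list by splitting on commas, and then put it back together
--     using the "cn=xxx" pieces as clues to where DNs start.
--
--     This has NOT BEEN TESTED with real data from the IDM
--     because we haven't been able to get more than one job code
--     back in a claim, but this should agree with what the IDM
--     folks have told us.
--     """
--
--     # split the list of jobcodes (as FQDNs) into parts, and then
--     # find all the "cn=" parts
--     parts = s.split(',')
--     cns = [part.startswith('cn=') for part in parts]
--
--     # label and group the parts
--     groups = groupby(zip(parts, _labeler(cns)),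
--                      key=lambda labeled_part: labeled_part[1])
--
--     # put the parts back together by group
--     return [
--         ','.join(map(lambda part: part[0], parts))
--         for parts in [list(items) for _, items in groups]
--     ]
-- ===== SOURCE B (Python) =====
-- def parse_jobcode_claim(s: str) -> "List[str]":
--     """Single pass: start a new FQDN at each 'cn=' part, glue other parts
--     onto the last FQDN (the very first part always opens one)."""
--     out = []
--     for part in s.split(','):
--         if part.startswith('cn=') or not out:
--             out.append(part)
--         else:
--             out[-1] += ',' + part
--     return out
-- ===== Notes on version B (the rewrite author's own statement) =====
-- stated objective: simpler
-- what changed: Replaces the _labeler generator + zip + itertools.groupby + per-group join pipeline by a single explicit pass that appends each split part as a new FQDN at 'cn=' (or as the first part) and otherwise concatenates it onto the last FQDN.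
import Mathlib
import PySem

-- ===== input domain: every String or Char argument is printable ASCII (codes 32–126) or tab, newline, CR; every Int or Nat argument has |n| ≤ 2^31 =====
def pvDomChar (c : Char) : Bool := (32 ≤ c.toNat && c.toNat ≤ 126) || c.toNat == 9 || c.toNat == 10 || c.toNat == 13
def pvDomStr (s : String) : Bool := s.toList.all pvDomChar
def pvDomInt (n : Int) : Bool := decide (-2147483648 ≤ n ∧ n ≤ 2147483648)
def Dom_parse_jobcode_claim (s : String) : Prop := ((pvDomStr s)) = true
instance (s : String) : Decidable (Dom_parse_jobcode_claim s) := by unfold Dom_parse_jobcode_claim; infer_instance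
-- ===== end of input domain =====

-- B replaces A's _labeler/zip/groupby/join pipeline by one pass that appends each part
-- to the last FQDN or starts a new one at 'cn='; objective: simpler, same cost.

-- ===== PORT A =====
-- part.startswith('cn=') (shared predicate of both Pythons)
def pvIsCn (p : List Char) : Bool := PySem.Chars.startswith p "cn=".toList

-- _labeler: running label, +1 at each True
def pvLabeler (label : Int) : List Bool → List Int
  | [] => []
  | n :: ns =>
    let label' := if n then label + 1 else label
    label' :: pvLabeler label' ns

-- itertools.groupby with key = second component (the label), groups materialised in order
def pvGroupby : List (List Char × Int) → List (List (List Char × Int))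
  | [] => []
  | x :: xs =>
    (x :: xs.takeWhile (fun y => y.2 == x.2)) ::
      pvGroupby (xs.dropWhile (fun y => y.2 == x.2))
  termination_by l => l.length
  decreasing_by
    simp only [List.length_cons]
    exact Nat.lt_succ_of_le (List.length_dropWhile_le _ _)

def parse_jobcode_claim (s : String) : List String :=
  let parts := PySem.Chars.splitOn s.toList [',']
  let cns := parts.map pvIsCn
  let groups := pvGroupby (parts.zip (pvLabeler 0 cns))
  groups.map (fun g => String.ofList (PySem.Chars.join [','] (g.map Prod.fst)))

-- ===== PORT B =====
-- loop body: out.append(part) on 'cn=' or empty out, else out[-1] += ',' + part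
def pvStep (out : List (List Char)) (part : List Char) : List (List Char) :=
  if pvIsCn part || out.isEmpty then out ++ [part]
  else out.dropLast ++ [out.getLastD [] ++ [','] ++ part]

def parse_jobcode_claim_alt (s : String) : List String :=
  ((PySem.Chars.splitOn s.toList [',']).foldl pvStep []).map String.ofList

-- ===== PRECONDITION & SPEC =====
def Spec_parse_jobcode_claim (s : String) (out : List String) : Prop := out = parse_jobcode_claim_alt s
instance (s : String) (out : List String) : Decidable (Spec_parse_jobcode_claim s out) := by unfold Spec_parse_jobcode_claim; infer_instance

-- ===== CLAIM (what is proved, stated in full; the proofs are below) =====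
def Claim_equal_parse_jobcode_claim : Prop := ∀ (s : String), Dom_parse_jobcode_claim s → Spec_parse_jobcode_claim s (parse_jobcode_claim s)

-- ===== LEMMAS AND PROOFS =====

-- common recursive description of the result (on char lists, one group at a time)
def pvGo (cur : List Char) : List (List Char) → List (List Char)
  | [] => [cur]
  | p :: ps => if pvIsCn p then cur :: pvGo p ps else pvGo (cur ++ [','] ++ p) ps

-- parts paired with their labels, starting from label l
def pvLab (l : Int) : List (List Char) → List (List Char × Int)
  | [] => []
  | p :: ps =>
    let l' := if pvIsCn p then l + 1 else l
    (p, l') :: pvLab l' ps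

lemma pvZipLab (parts : List (List Char)) : ∀ l : Int,
    parts.zip (pvLabeler l (parts.map pvIsCn)) = pvLab l parts := by
  induction parts with
  | nil => intro l; rfl
  | cons p ps ih =>
    intro l
    simp only [List.map, pvLabeler, pvLab, List.zip_cons_cons, ih]

lemma pvTakeWhileLab (ps : List (List Char)) : ∀ l : Int,
    (pvLab l ps).takeWhile (fun y => y.2 == l) =
      (ps.takeWhile (fun p => !pvIsCn p)).map (fun p => (p, l)) := by
  induction ps with
  | nil => intro l; rfl
  | cons p ps ih =>
    intro l
    by_cases h : pvIsCn p = true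
    · simp [pvLab, h, List.takeWhile]
    · simp only [Bool.not_eq_true] at h
      simp [pvLab, h, List.takeWhile, ih l]

lemma pvDropWhileLab (ps : List (List Char)) : ∀ l : Int,
    (pvLab l ps).dropWhile (fun y => y.2 == l) =
      pvLab l (ps.dropWhile (fun p => !pvIsCn p)) := by
  induction ps with
  | nil => intro l; rfl
  | cons p ps ih =>
    intro l
    by_cases h : pvIsCn p = true
    · have hne : ((l + 1 : Int) == l) = false := by simp
      simp [pvLab, h, List.dropWhile, hne]
    · simp only [Bool.not_eq_true] at h
      simp [pvLab, h, List.dropWhile, ih l]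

-- gluing a ++ ',' ++ b into the head of a join
lemma pvJoinGlue (a b : List Char) (rest : List (List Char)) :
    PySem.Chars.join [','] ((a ++ [','] ++ b) :: rest) =
      a ++ [','] ++ PySem.Chars.join [','] (b :: rest) := by
  cases rest with
  | nil => simp [PySem.Chars.join_singleton]
  | cons r rs =>
    rw [PySem.Chars.join_cons_cons, PySem.Chars.join_cons_cons]
    simp [List.append_assoc]

-- pvGo produces the joined head group followed by the recursion on the rest
lemma pvGoSplit (ps : List (List Char)) : ∀ cur : List Char,
    pvGo cur ps =
      PySem.Chars.join [','] (cur :: ps.takeWhile (fun p => !pvIsCn p)) ::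
        (match ps.dropWhile (fun p => !pvIsCn p) with
          | [] => []
          | q :: qs => pvGo q qs) := by
  induction ps with
  | nil => intro cur; simp [pvGo, PySem.Chars.join_singleton]
  | cons p ps ih =>
    intro cur
    by_cases h : pvIsCn p = true
    · simp [pvGo, h, List.takeWhile, List.dropWhile, PySem.Chars.join_singleton]
    · simp only [Bool.not_eq_true] at h
      simp only [pvGo, h, Bool.false_eq_true, if_false, List.takeWhile, List.dropWhile,
        Bool.not_false, ih (cur ++ [','] ++ p), pvJoinGlue, PySem.Chars.join_cons_cons]

-- A's pipeline equals pvGo, for any starting label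
lemma pvMainA (n : Nat) : ∀ (ps : List (List Char)), ps.length ≤ n → ∀ (p : List Char) (l : Int),
    (pvGroupby (pvLab l (p :: ps))).map
        (fun g => PySem.Chars.join [','] (g.map Prod.fst)) = pvGo p ps := by
  induction n with
  | zero =>
    intro ps hps p l
    have : ps = [] := List.eq_nil_of_length_eq_zero (Nat.le_zero.mp hps)
    subst this
    simp [pvLab, pvGroupby, pvGo, PySem.Chars.join_singleton]
  | succ n ih =>
    intro ps hps p l
    set l' : Int := if pvIsCn p then l + 1 else l with hl'
    have hlab : pvLab l (p :: ps) = (p, l') :: pvLab l' ps := by simp [pvLab, hl']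
    rw [hlab, pvGroupby, pvTakeWhileLab, pvDropWhileLab, pvGoSplit]
    have hmapfst :
        ((p, l') :: ((ps.takeWhile (fun q => !pvIsCn q)).map (fun q => (q, l')))).map Prod.fst
          = p :: ps.takeWhile (fun q => !pvIsCn q) := by
      simp [List.map_map, Function.comp_def]
    cases hdw : ps.dropWhile (fun q => !pvIsCn q) with
    | nil =>
      simp only [pvLab, pvGroupby, List.map_cons, List.map_nil, hmapfst]
    | cons q qs =>
      have hqs : qs.length ≤ n := by
        have h1 : (q :: qs).length ≤ ps.length := hdw ▸ List.length_dropWhile_le _ _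
        simp only [List.length_cons] at h1
        omega
      simp only [List.map_cons, hmapfst, ih qs hqs q l']

-- B's fold keeps the finished FQDNs and extends the open one
lemma pvMainB (ps : List (List Char)) : ∀ (acc : List (List Char)) (cur : List Char),
    ps.foldl pvStep (acc ++ [cur]) = acc ++ pvGo cur ps := by
  induction ps with
  | nil => intro acc cur; simp [pvGo]
  | cons p ps ih =>
    intro acc cur
    by_cases h : pvIsCn p = true
    · have hstep : pvStep (acc ++ [cur]) p = (acc ++ [cur]) ++ [p] := by
        simp [pvStep, h]
      rw [List.foldl_cons, hstep, ih (acc ++ [cur]) p]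
      simp [pvGo, h]
    · simp only [Bool.not_eq_true] at h
      have hstep : pvStep (acc ++ [cur]) p = acc ++ [cur ++ [','] ++ p] := by
        simp [pvStep, h]
      rw [List.foldl_cons, hstep, ih acc (cur ++ [','] ++ p)]
      simp [pvGo, h]

-- ===== VERDICT (by name: the statement is the Claim_ definition above) =====
theorem parse_jobcode_claim_spec : Claim_equal_parse_jobcode_claim := by
  intro s _
  unfold Spec_parse_jobcode_claim
  cases hsplit : PySem.Chars.splitOn s.toList [','] with
  | nil => simp [parse_jobcode_claim, parse_jobcode_claim_alt, hsplit, pvGroupby]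
  | cons p ps =>
    simp only [parse_jobcode_claim, parse_jobcode_claim_alt, hsplit]
    rw [pvZipLab]
    have hA : (pvGroupby (pvLab 0 (p :: ps))).map
          (fun g => String.ofList (PySem.Chars.join [','] (g.map Prod.fst))) =
        ((pvGroupby (pvLab 0 (p :: ps))).map
          (fun g => PySem.Chars.join [','] (g.map Prod.fst))).map String.ofList := by
      simp [List.map_map]
    rw [hA, pvMainA ps.length ps le_rfl p 0]
    have hb : (p :: ps).foldl pvStep [] = pvGo p ps := by
      have hstep : pvStep [] p = [] ++ [p] := by
        simp [pvStep]
      rw [List.foldl_cons, hstep, pvMainB ps [] p]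
      simp
    rw [hb]
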